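-- pv_equiv track=rewrite | github.com/jsiri84/wta-tennis-prediction-model | total_games_improvements.py | get_tournament_level
-- ===== SOURCE A (Python) =====
-- def get_tournament_level(tourn):
--     tourn_lower = tourn.lower()
--     if any(gs in tourn_lower for gs in ['australian open', 'french open', 'roland garros', 'wimbledon', 'us open']):
--         return 4
--     if '1000' in tourn_lower or any(t in tourn_lower for t in ['indian wells', 'miami', 'madrid', 'rome', 'beijing', 'canada']):
--         return 3
--     if '500' in tourn_lower:
--         return 2
--     return 1
-- ===== SOURCE B (Python) =====
-- KEYWORDS = [
--     ('australian open', 4), ('french open', 4), ('roland garros', 4),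
--     ('wimbledon', 4), ('us open', 4),
--     ('1000', 3), ('indian wells', 3), ('miami', 3), ('madrid', 3),
--     ('rome', 3), ('beijing', 3), ('canada', 3),
--     ('500', 2),
-- ]
--
-- def get_tournament_level(tourn):
--     # Text-driven scan: walk each position of the lowered name once and test
--     # which keyword starts there, keeping a running maximum tier.
--     tl = tourn.lower()
--     best = 1
--     for i in range(len(tl)):
--         for kw, lvl in KEYWORDS:
--             if tl.startswith(kw, i) and lvl > best:
--                 best = lvl
--     return best
-- ===== Notes on version B (the rewrite author's own statement) =====
-- stated objective: alternative
-- what changed: Replaced A's pattern-driven short-circuit cascade of substring membership tests with a text-driven scan: one pass over every position of the lowered name, testing at each position which keyword starts there (startswith with offset) while keeping a running maximum tier, correct because tier numbers are monotone with the cascade's priority.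
import Mathlib
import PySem

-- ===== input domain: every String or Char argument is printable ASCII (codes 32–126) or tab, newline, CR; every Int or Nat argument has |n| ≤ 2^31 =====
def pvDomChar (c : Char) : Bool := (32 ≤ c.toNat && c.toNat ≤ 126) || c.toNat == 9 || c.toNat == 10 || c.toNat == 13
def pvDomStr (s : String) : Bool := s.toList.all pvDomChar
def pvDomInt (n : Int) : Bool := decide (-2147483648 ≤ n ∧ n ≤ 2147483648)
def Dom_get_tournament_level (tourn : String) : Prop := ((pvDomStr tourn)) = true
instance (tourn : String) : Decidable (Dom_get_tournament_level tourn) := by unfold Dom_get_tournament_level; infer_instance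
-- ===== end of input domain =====

-- B replaces A's short-circuit cascade of substring tests by a text-driven scan of every
-- position of the lowered name with a running-max tier accumulator (objective: alternative).

-- ===== PORT A =====
def get_tournament_level (tourn : String) : Int :=
  let tourn_lower := PySem.Str.lower tourn
  if (["australian open", "french open", "roland garros", "wimbledon", "us open"]).any
      (fun gs => PySem.Str.isIn gs tourn_lower) then 4
  else if PySem.Str.isIn "1000" tourn_lower ||
      (["indian wells", "miami", "madrid", "rome", "beijing", "canada"]).any
        (fun t => PySem.Str.isIn t tourn_lower) then 3
  else if PySem.Str.isIn "500" tourn_lower then 2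
  else 1

-- ===== PORT B =====
def pvKeywords : List (String × Int) :=
  [("australian open", 4), ("french open", 4), ("roland garros", 4),
   ("wimbledon", 4), ("us open", 4),
   ("1000", 3), ("indian wells", 3), ("miami", 3), ("madrid", 3),
   ("rome", 3), ("beijing", 3), ("canada", 3),
   ("500", 2)]

-- `tl.startswith(kw, i)` with 0 ≤ i is exactly "kw.toList is a prefix of tl.toList.drop i".
def get_tournament_level_alt (tourn : String) : Int :=
  let tl := (PySem.Str.lower tourn).toList
  (List.range tl.length).foldl
    (fun best i =>
      pvKeywords.foldl
        (fun best p =>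
          if p.1.toList.isPrefixOf (tl.drop i) && decide (p.2 > best) then p.2 else best)
        best)
    1

-- ===== PRECONDITION & SPEC =====
def Spec_get_tournament_level (tourn : String) (out : Int) : Prop := out = get_tournament_level_alt tourn
instance (tourn : String) (out : Int) : Decidable (Spec_get_tournament_level tourn out) := by unfold Spec_get_tournament_level; infer_instance

-- ===== CLAIM (what is proved, stated in full; the proofs are below) =====
def Claim_equal_get_tournament_level : Prop := ∀ (tourn : String), Dom_get_tournament_level tourn → Spec_get_tournament_level tourn (get_tournament_level tourn)

-- ===== LEMMAS AND PROOFS =====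

-- generic foldl lemmas for a non-decreasing step
theorem pv_foldl_mono {α : Type} (g : Int → α → Int) (h : ∀ b x, b ≤ g b x) :
    ∀ (l : List α) (b : Int), b ≤ l.foldl g b := by
  intro l
  induction l with
  | nil => intro b; simp
  | cons x xs ih => intro b; exact le_trans (h b x) (ih (g b x))

theorem pv_foldl_ub {α : Type} (g : Int → α → Int) (M : Int) (l : List α)
    (h : ∀ b x, x ∈ l → b ≤ M → g b x ≤ M) :
    ∀ b, b ≤ M → l.foldl g b ≤ M := by
  induction l with
  | nil => intro b hb; simpa using hb
  | cons x xs ih =>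
      intro b hb
      exact ih (fun b y hy => h b y (List.mem_cons_of_mem x hy)) (g b x)
        (h b x List.mem_cons_self hb)

theorem pv_foldl_lb {α : Type} (g : Int → α → Int) (hmono : ∀ b x, b ≤ g b x)
    (v : Int) {x : α} {l : List α} (hx : x ∈ l) (h : ∀ b, v ≤ g b x) :
    ∀ b, v ≤ l.foldl g b := by
  induction l with
  | nil => cases hx
  | cons y ys ih =>
      intro b
      rcases List.mem_cons.mp hx with rfl | hmem
      · exact le_trans (h b) (pv_foldl_mono g hmono ys (g b x))
      · exact ih hmem (g b y)

-- the inner step of B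
def pvStep (tl : List Char) (i : Nat) (best : Int) (p : String × Int) : Int :=
  if p.1.toList.isPrefixOf (tl.drop i) && decide (p.2 > best) then p.2 else best

theorem pvStep_mono (tl : List Char) (i : Nat) : ∀ (b : Int) (p : String × Int), b ≤ pvStep tl i b p := by
  intro b p
  unfold pvStep
  split_ifs with h
  · simp only [Bool.and_eq_true, decide_eq_true_eq] at h; omega
  · exact le_refl b

def pvInner (tl : List Char) (i : Nat) (b : Int) : Int := pvKeywords.foldl (pvStep tl i) b

theorem pvInner_mono (tl : List Char) (i : Nat) (b : Int) : b ≤ pvInner tl i b :=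
  pv_foldl_mono _ (pvStep_mono tl i) _ b

theorem pvAlt_eq (tourn : String) :
    get_tournament_level_alt tourn =
      (List.range (PySem.Str.lower tourn).toList.length).foldl
        (fun b i => pvInner (PySem.Str.lower tourn).toList i b) 1 := rfl

-- a nonempty keyword matching as infix matches at some position inside the range
theorem pv_match_pos {l tl : List Char} (hne : l ≠ []) (h : l <:+: tl) :
    ∃ j, j < tl.length ∧ l <+: tl.drop j := by
  obtain ⟨s, t, rfl⟩ := h
  refine ⟨s.length, ?_, ?_⟩
  · have : l.length ≠ 0 := fun h0 => hne (List.eq_nil_of_length_eq_zero h0)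
    simp [List.length_append]; omega
  · have he : s ++ l ++ t = s ++ (l ++ t) := by simp
    rw [he, List.drop_left]
    exact ⟨t, rfl⟩

theorem pv_pos_match {l tl : List Char} {j : Nat} (h : l <+: tl.drop j) : l <:+: tl :=
  h.isInfix.trans (List.drop_suffix j tl).isInfix

-- lower bound: a matching keyword forces its level into the result
theorem pv_lb (tourn : String) (kw : String) (lvl : Int)
    (hmem : (kw, lvl) ∈ pvKeywords) (hne : kw.toList ≠ [])
    (hin : PySem.Str.isIn kw (PySem.Str.lower tourn) = true) :
    lvl ≤ get_tournament_level_alt tourn := by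
  set tl := (PySem.Str.lower tourn).toList with htl
  have hinf : kw.toList <:+: tl := (PySem.Str.isIn_iff_infix _ _).mp hin
  obtain ⟨j, hj, hpre⟩ := pv_match_pos hne hinf
  rw [pvAlt_eq]
  refine pv_foldl_lb _ (fun b i => pvInner_mono tl i b) lvl
    (List.mem_range.mpr hj) (fun b => ?_) 1
  refine pv_foldl_lb _ (pvStep_mono tl j) lvl hmem (fun b' => ?_) b
  unfold pvStep
  split_ifs with h
  · simp
  · simp only [Bool.and_eq_true, decide_eq_true_eq, not_and] at h
    have := h ((List.isPrefixOf_iff_prefix).mpr hpre)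
    omega

-- upper bound: if every keyword whose level exceeds M fails to match, the result is ≤ M
theorem pv_ub (tourn : String) (M : Int) (h1 : (1:Int) ≤ M)
    (h : ∀ kw lvl, (kw, lvl) ∈ pvKeywords →
        PySem.Str.isIn kw (PySem.Str.lower tourn) = true → lvl ≤ M) :
    get_tournament_level_alt tourn ≤ M := by
  set tl := (PySem.Str.lower tourn).toList with htl
  rw [pvAlt_eq]
  refine pv_foldl_ub _ M _ (fun b i _ hb => ?_) 1 h1
  refine pv_foldl_ub _ M _ (fun b' p hp hb' => ?_) b hb
  unfold pvStep
  split_ifs with hc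
  · simp only [Bool.and_eq_true, decide_eq_true_eq] at hc
    have hin : PySem.Str.isIn p.1 (PySem.Str.lower tourn) = true :=
      (PySem.Str.isIn_iff_infix _ _).mpr
        (pv_pos_match ((List.isPrefixOf_iff_prefix).mp hc.1))
    exact h p.1 p.2 hp hin
  · exact hb'

theorem pv_lb_one (tourn : String) : (1:Int) ≤ get_tournament_level_alt tourn := by
  rw [pvAlt_eq]
  exact pv_foldl_mono _ (fun b i => pvInner_mono _ i b) _ 1

-- ===== VERDICT (by name: the statement is the Claim_ definition above) =====
theorem get_tournament_level_spec : Claim_equal_get_tournament_level := by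
  intro tourn _
  unfold Spec_get_tournament_level get_tournament_level
  set low := PySem.Str.lower tourn with hlow
  simp only [List.any_cons, List.any_nil, Bool.or_false]
  split_ifs with h4 h3 h2
  -- A = 4 : some grand-slam keyword matches
  · simp only [Bool.or_eq_true] at h4
    have hle : get_tournament_level_alt tourn ≤ 4 := by
      refine pv_ub tourn 4 (by norm_num) (fun kw lvl hmem _ => ?_)
      fin_cases hmem <;> norm_num
    have hge : (4:Int) ≤ get_tournament_level_alt tourn := by
      rcases h4 with (h|h|h|h|h) <;>
        exact pv_lb tourn _ 4 (by simp [pvKeywords]) (by decide) h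
    omega
  -- A = 3 : no grand slam, a 1000-tier keyword matches
  · simp only [Bool.or_eq_true, not_or] at h4 h3
    have hle : get_tournament_level_alt tourn ≤ 3 := by
      refine pv_ub tourn 3 (by norm_num) (fun kw lvl hmem hin => ?_)
      fin_cases hmem <;> simp_all
    have hge : (3:Int) ≤ get_tournament_level_alt tourn := by
      rcases h3 with h|h|h|h|h|h|h <;>
        exact pv_lb tourn _ 3 (by simp [pvKeywords]) (by decide) h
    omega
  -- A = 2 : only "500" matches
  · simp only [Bool.or_eq_true, not_or] at h4 h3
    have hle : get_tournament_level_alt tourn ≤ 2 := by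
      refine pv_ub tourn 2 (by norm_num) (fun kw lvl hmem hin => ?_)
      fin_cases hmem <;> simp_all
    have hge : (2:Int) ≤ get_tournament_level_alt tourn :=
      pv_lb tourn "500" 2 (by simp [pvKeywords]) (by decide) h2
    omega
  -- A = 1 : nothing matches
  · simp only [Bool.or_eq_true, not_or] at h4 h3
    have hle : get_tournament_level_alt tourn ≤ 1 := by
      refine pv_ub tourn 1 (by norm_num) (fun kw lvl hmem hin => ?_)
      fin_cases hmem <;> simp_all
    have hge := pv_lb_one tourn
    omega
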